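-- pv_equiv track=rewrite | github.com/renecriz-lang/plataforma-agro-inteligente | utils/resiliencia_enso.py | decendios_da_safra
-- ===== SOURCE A (Python) =====
-- def decendios_da_safra(mes_ini: int, mes_fim: int) -> list[int]:
--     """Retorna decêndios (1-36) cobertos pela safra na ordem plantio→colheita.
--
--     Se mes_fim < mes_ini, a safra cruza a virada do ano.
--     Ex: mes_ini=10, mes_fim=3 → [28,29,30, 31,32,33, 34,35,36, 1,2,3, 4,5,6, 7,8,9]
--     """
--     decs: list[int] = []
--     if mes_fim >= mes_ini:
--         meses = range(mes_ini, mes_fim + 1)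
--     else:
--         meses = list(range(mes_ini, 13)) + list(range(1, mes_fim + 1))
--     for m in meses:
--         decs.extend([(m - 1) * 3 + 1, (m - 1) * 3 + 2, (m - 1) * 3 + 3])
--     return decs
-- ===== SOURCE B (Python) =====
-- def decendios_da_safra(mes_ini: int, mes_fim: int) -> list[int]:
--     """Decendios covered by the season, computed as contiguous index ranges."""
--     if mes_fim >= mes_ini:
--         return list(range((mes_ini - 1) * 3 + 1, mes_fim * 3 + 1))
--     return list(range((mes_ini - 1) * 3 + 1, 37)) + list(range(1, mes_fim * 3 + 1))
-- ===== Notes on version B (the rewrite author's own statement) =====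
-- stated objective: simpler
-- what changed: Replaces the per-month loop that extends the list by three decendios at a time with a direct arithmetic computation of the contiguous decendio index range(s), splitting once at the year boundary.
import Mathlib
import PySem

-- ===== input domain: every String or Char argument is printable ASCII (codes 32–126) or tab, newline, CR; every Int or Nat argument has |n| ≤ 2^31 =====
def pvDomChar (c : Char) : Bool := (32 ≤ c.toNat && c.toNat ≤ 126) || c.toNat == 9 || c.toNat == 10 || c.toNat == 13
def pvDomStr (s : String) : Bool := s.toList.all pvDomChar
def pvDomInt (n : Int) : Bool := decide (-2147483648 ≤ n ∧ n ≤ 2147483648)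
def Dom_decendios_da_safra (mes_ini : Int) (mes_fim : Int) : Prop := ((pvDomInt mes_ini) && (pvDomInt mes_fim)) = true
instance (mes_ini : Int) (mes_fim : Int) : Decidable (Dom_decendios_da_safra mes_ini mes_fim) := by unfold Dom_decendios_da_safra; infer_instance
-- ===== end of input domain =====

-- B replaces A's per-month loop by direct arithmetic range(s) of decendio indices (simpler).


-- ===== PORT A =====
def decendios_da_safra (mes_ini : Int) (mes_fim : Int) : List Int :=
  let meses : List Int :=
    if mes_fim ≥ mes_ini then PySem.List.pyRange mes_ini (mes_fim + 1) 1
    else PySem.List.pyRange mes_ini 13 1 ++ PySem.List.pyRange 1 (mes_fim + 1) 1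
  meses.foldl (fun decs m => decs ++ [(m - 1) * 3 + 1, (m - 1) * 3 + 2, (m - 1) * 3 + 3]) []

-- ===== PORT B =====
def decendios_da_safra_alt (mes_ini : Int) (mes_fim : Int) : List Int :=
  if mes_fim ≥ mes_ini then PySem.List.pyRange ((mes_ini - 1) * 3 + 1) (mes_fim * 3 + 1) 1
  else PySem.List.pyRange ((mes_ini - 1) * 3 + 1) 37 1 ++ PySem.List.pyRange 1 (mes_fim * 3 + 1) 1

-- ===== PRECONDITION & SPEC =====
def Spec_decendios_da_safra (mes_ini : Int) (mes_fim : Int) (out : List Int) : Prop := out = decendios_da_safra_alt mes_ini mes_fim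
instance (mes_ini : Int) (mes_fim : Int) (out : List Int) : Decidable (Spec_decendios_da_safra mes_ini mes_fim out) := by unfold Spec_decendios_da_safra; infer_instance

-- ===== CLAIM (what is proved, stated in full; the proofs are below) =====
def Claim_equal_decendios_da_safra : Prop := ∀ (mes_ini : Int) (mes_fim : Int), Dom_decendios_da_safra mes_ini mes_fim → Spec_decendios_da_safra mes_ini mes_fim (decendios_da_safra mes_ini mes_fim)

-- ===== LEMMAS AND PROOFS =====

/-- Folding A's three-decendio extension over the months `a..b-1` appends exactly
the contiguous decendio range `3(a-1)+1 .. 3(b-1)` (exclusive upper `(b-1)*3+1`). -/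
theorem fold_months_eq_range (a b : Int) (acc : List Int) :
    (PySem.List.pyRange a b 1).foldl
      (fun decs m => decs ++ [(m - 1) * 3 + 1, (m - 1) * 3 + 2, (m - 1) * 3 + 3]) acc
    = acc ++ PySem.List.pyRange ((a - 1) * 3 + 1) ((b - 1) * 3 + 1) 1 := by
  by_cases h : b ≤ a
  · rw [PySem.List.pyRange_one_eq_nil h, PySem.List.pyRange_one_eq_nil (by omega)]
    simp
  · have hab : a < b := by omega
    have hn : ((b - (a + 1)).toNat) < (b - a).toNat := by omega
    rw [PySem.List.pyRange_one_cons hab]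
    simp only [List.foldl_cons]
    rw [fold_months_eq_range (a + 1) b (acc ++ [(a - 1) * 3 + 1, (a - 1) * 3 + 2, (a - 1) * 3 + 3])]
    rw [PySem.List.pyRange_one_cons (a := (a - 1) * 3 + 1) (b := (b - 1) * 3 + 1) (by omega)]
    rw [PySem.List.pyRange_one_cons (a := (a - 1) * 3 + 1 + 1) (b := (b - 1) * 3 + 1) (by omega)]
    rw [PySem.List.pyRange_one_cons (a := (a - 1) * 3 + 1 + 1 + 1) (b := (b - 1) * 3 + 1) (by omega)]
    simp only [show (a - 1) * 3 + 1 + 1 = (a - 1) * 3 + 2 from by ring,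
      show (a - 1) * 3 + 2 + 1 = (a - 1) * 3 + 3 from by ring,
      show (a - 1) * 3 + 3 + 1 = (a + 1 - 1) * 3 + 1 from by ring]
    simp
termination_by (b - a).toNat

-- ===== VERDICT (by name: the statement is the Claim_ definition above) =====
theorem decendios_da_safra_spec : Claim_equal_decendios_da_safra := by
  intro mes_ini mes_fim _
  unfold Spec_decendios_da_safra decendios_da_safra decendios_da_safra_alt
  by_cases h : mes_fim ≥ mes_ini
  · simp only [h, if_pos]
    rw [fold_months_eq_range]
    have : (mes_fim + 1 - 1) * 3 + 1 = mes_fim * 3 + 1 := by ring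
    rw [this]; simp
  · simp only [h, if_false, List.foldl_append]
    rw [fold_months_eq_range, fold_months_eq_range]
    have h13 : ((13 : Int) - 1) * 3 + 1 = 37 := by norm_num
    have h1 : ((1 : Int) - 1) * 3 + 1 = 1 := by norm_num
    have h2 : (mes_fim + 1 - 1) * 3 + 1 = mes_fim * 3 + 1 := by ring
    rw [h13, h1, h2]; simp
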